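-- pv_equiv track=rewrite | github.com/Umama-shaikh/Physical-AI---Humanoid-Robotics-Textbook | examples/python/planner_logic.py | _identify_capabilities
-- ===== SOURCE A (Python) =====
-- from typing import List, Tuple, Dict, Any, Optional, Callable
--
-- def _identify_capabilities(goal: str) -> List[str]:
--     """Identify required robot capabilities"""
--     capabilities = []
--     goal_lower = goal.lower()
--
--     if any(word in goal_lower for word in ['go to', 'navigate', 'move', 'walk']):
--         capabilities.append('navigation')
--         capabilities.append('path_planning')
--
--     if any(word in goal_lower for word in ['pick', 'grasp', 'take', 'get']):
--         capabilities.append('manipulation')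
--         capabilities.append('grasping')
--
--     if any(word in goal_lower for word in ['follow', 'greet', 'wave', 'hello']):
--         capabilities.append('social_interaction')
--
--     return capabilities
-- ===== SOURCE B (Python) =====
-- from typing import List
--
-- # keyword -> bit of its capability group
-- _BIT = {
--     'go to': 1, 'navigate': 1, 'move': 1, 'walk': 1,
--     'pick': 2, 'grasp': 2, 'take': 2, 'get': 2,
--     'follow': 4, 'greet': 4, 'wave': 4, 'hello': 4,
-- }
--
-- # precomputed output for every possible 3-bit mask
-- _OUT = [(['navigation', 'path_planning'] if m & 1 else [])
--         + (['manipulation', 'grasping'] if m & 2 else [])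
--         + (['social_interaction'] if m & 4 else [])
--         for m in range(8)]
--
-- def _identify_capabilities(goal: str) -> List[str]:
--     """Identify required robot capabilities"""
--     goal_lower = goal.lower()
--     mask = 0
--     for word, bit in _BIT.items():
--         if word in goal_lower:
--             mask |= bit
--     return list(_OUT[mask])
-- ===== Notes on version B (the rewrite author's own statement) =====
-- stated objective: alternative
-- what changed: Instead of three conditional append blocks, B folds a flat keyword->group-bit map into a 3-bit mask in one pass and returns the precomputed capability list indexed by that mask from an 8-entry table.
import Mathlib
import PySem

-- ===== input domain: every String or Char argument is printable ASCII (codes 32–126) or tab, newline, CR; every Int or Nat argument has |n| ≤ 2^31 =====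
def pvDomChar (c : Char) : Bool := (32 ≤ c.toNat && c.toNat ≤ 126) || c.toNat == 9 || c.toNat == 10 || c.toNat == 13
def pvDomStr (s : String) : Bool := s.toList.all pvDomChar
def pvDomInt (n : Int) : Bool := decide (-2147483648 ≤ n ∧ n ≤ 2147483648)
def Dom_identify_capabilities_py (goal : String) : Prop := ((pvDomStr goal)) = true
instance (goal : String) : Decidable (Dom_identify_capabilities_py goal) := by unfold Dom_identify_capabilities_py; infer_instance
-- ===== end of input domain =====

-- B: one pass over a flat keyword->bit map builds a 3-bit mask, answer looked up in a precomputed 8-entry table (alternative decomposition, same cost).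

-- ===== PORT A =====
def identify_capabilities_py (goal : String) : List String :=
  let goal_lower := PySem.Str.lower goal
  let capabilities : List String := []
  let capabilities :=
    if (["go to", "navigate", "move", "walk"].any fun word => PySem.Str.isIn word goal_lower) then
      capabilities ++ ["navigation"] ++ ["path_planning"]
    else capabilities
  let capabilities :=
    if (["pick", "grasp", "take", "get"].any fun word => PySem.Str.isIn word goal_lower) then
      capabilities ++ ["manipulation"] ++ ["grasping"]
    else capabilities
  let capabilities :=
    if (["follow", "greet", "wave", "hello"].any fun word => PySem.Str.isIn word goal_lower) then
      capabilities ++ ["social_interaction"]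
    else capabilities
  capabilities

-- ===== PORT B =====
def pvBit : List (String × Nat) :=
  [("go to", 1), ("navigate", 1), ("move", 1), ("walk", 1),
   ("pick", 2), ("grasp", 2), ("take", 2), ("get", 2),
   ("follow", 4), ("greet", 4), ("wave", 4), ("hello", 4)]

def pvOut : List (List String) :=
  (List.range 8).map (fun m =>
    (if m &&& 1 ≠ 0 then ["navigation", "path_planning"] else [])
    ++ (if m &&& 2 ≠ 0 then ["manipulation", "grasping"] else [])
    ++ (if m &&& 4 ≠ 0 then ["social_interaction"] else []))

def identify_capabilities_py_alt (goal : String) : List String :=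
  let goal_lower := PySem.Str.lower goal
  let mask := pvBit.foldl (fun m p => if PySem.Str.isIn p.1 goal_lower then m ||| p.2 else m) 0
  -- _OUT[mask]: mask < 8 always, so the in-range lookup with default [] is exact
  pvOut.getD mask []

-- ===== PRECONDITION & SPEC =====
def Spec_identify_capabilities_py (goal : String) (out : List String) : Prop := out = identify_capabilities_py_alt goal
instance (goal : String) (out : List String) : Decidable (Spec_identify_capabilities_py goal out) := by unfold Spec_identify_capabilities_py; infer_instance

-- ===== CLAIM (what is proved, stated in full; the proofs are below) =====
def Claim_equal_identify_capabilities_py : Prop := ∀ (goal : String), Dom_identify_capabilities_py goal → Spec_identify_capabilities_py goal (identify_capabilities_py goal)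

-- ===== LEMMAS AND PROOFS =====
-- With the 12 substring tests abstracted to arbitrary Bools, the two programs are
-- equal as functions of those Bools: a finite check (4096 cases).
theorem pvKey (a b c d e f g h i j k l : Bool) :
    (let c0 : List String := []
     let c1 := if ([a, b, c, d].any id) then c0 ++ ["navigation"] ++ ["path_planning"] else c0
     let c2 := if ([e, f, g, h].any id) then c1 ++ ["manipulation"] ++ ["grasping"] else c1
     if ([i, j, k, l].any id) then c2 ++ ["social_interaction"] else c2)
    =
    (let mask := ([(a, 1), (b, 1), (c, 1), (d, 1), (e, 2), (f, 2), (g, 2), (h, 2),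
                   (i, 4), (j, 4), (k, 4), (l, 4)] : List (Bool × Nat)).foldl
        (fun m p => if p.1 then m ||| p.2 else m) 0
     pvOut.getD mask []) := by
  cases a <;> cases b <;> cases c <;> cases d <;> cases e <;> cases f <;>
    cases g <;> cases h <;> cases i <;> cases j <;> cases k <;> cases l <;> rfl

-- ===== VERDICT (by name: the statement is the Claim_ definition above) =====
theorem identify_capabilities_py_spec : Claim_equal_identify_capabilities_py := by
  intro goal _
  unfold Spec_identify_capabilities_py identify_capabilities_py identify_capabilities_py_alt pvBit
  have := pvKey
    (PySem.Str.isIn "go to" (PySem.Str.lower goal)) (PySem.Str.isIn "navigate" (PySem.Str.lower goal))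
    (PySem.Str.isIn "move" (PySem.Str.lower goal)) (PySem.Str.isIn "walk" (PySem.Str.lower goal))
    (PySem.Str.isIn "pick" (PySem.Str.lower goal)) (PySem.Str.isIn "grasp" (PySem.Str.lower goal))
    (PySem.Str.isIn "take" (PySem.Str.lower goal)) (PySem.Str.isIn "get" (PySem.Str.lower goal))
    (PySem.Str.isIn "follow" (PySem.Str.lower goal)) (PySem.Str.isIn "greet" (PySem.Str.lower goal))
    (PySem.Str.isIn "wave" (PySem.Str.lower goal)) (PySem.Str.isIn "hello" (PySem.Str.lower goal))
  simpa [List.any, List.foldl] using this
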